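-- pv_equiv track=rewrite | github.com/arashmodrad/test_hf_changes | .github/scripts/export_map_errors.py | parse_issue_body
-- ===== SOURCE A (Python) =====
-- def parse_issue_body(body: str) -> dict:
--     """
--     Parses the issue body looking for markdown headers
--     to extract Item Identifier and Description.
--     This is a workaround if the Issue Form doesn't embed the JSON comment.
--     """
--     data = {}
--     if not body:
--         return data
--
--     # Split the body into lines
--     lines = body.splitlines()
--
--     # Flags to know which section we are currently in
--     in_item_identifier_section = False
--     in_description_section = False
--
--     item_identifier_lines = []
--     description_lines = []
--
--     for line in lines:
--         # Normalize line (strip whitespace) for easier comparison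
--         stripped_line = line.strip()
--
--         # Check for the start of the Item Identifier section
--         if stripped_line == "### Item Identifier":
--             # Reset state, start collecting lines for this section
--             in_item_identifier_section = True
--             in_description_section = False
--             continue # Skip the header line itself
--
--         # Check for the start of the Description section
--         elif stripped_line == "### Describe the issue":
--              # Reset state, start collecting lines for this section
--             in_item_identifier_section = False
--             in_description_section = True
--             continue # Skip the header line itself
--
--         # If we are not in any specific section, ignore the line (e.g. lines before first header)
--         if not in_item_identifier_section and not in_description_section:
--             continue
--
--         # If we are in a section, collect the line content
--         if in_item_identifier_section:
--             # Item identifier is usually a single line after the header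
--             # We'll take the first non-empty line found in this section
--             if stripped_line and 'item-identifier' not in data: # Only take the first non-empty line
--                  data['item-identifier'] = stripped_line
--                  # We found it, stop collecting for this section
--                  in_item_identifier_section = False # Treat it as single-line field
--
--         elif in_description_section:
--             # Description can be multiple lines. Collect all non-empty lines.
--             if stripped_line:
--                 description_lines.append(stripped_line)
--
--     # Join description lines into a single string
--     if description_lines:
--         data['issue-description'] = "\n".join(description_lines) # Join with newline
--
--     return data
-- ===== SOURCE B (Python) =====
-- def parse_issue_body(body: str) -> dict:
--     """Two-pass rewrite: label each line by its section, then derive the fields."""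
--     if not body:
--         return {}
--
--     labeled = []
--     label = None
--     for line in body.splitlines():
--         stripped = line.strip()
--         if stripped == "### Item Identifier":
--             label = "item"
--         elif stripped == "### Describe the issue":
--             label = "desc"
--         elif label is not None:
--             labeled.append((label, stripped))
--
--     data = {}
--     item = next((s for lab, s in labeled if lab == "item" and s), None)
--     if item is not None:
--         data["item-identifier"] = item
--     desc = [s for lab, s in labeled if lab == "desc" and s]
--     if desc:
--         data["issue-description"] = "\n".join(desc)
--     return data
-- ===== Notes on version B (the rewrite author's own statement) =====
-- stated objective: simpler
-- what changed: Replaces A's two mutable section flags and in-loop conditional dict insertion with a single labelling pass (tagging each line with its section) followed by separate derivations: first non-empty item-labelled line and the filtered desc-labelled lines.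
import Mathlib
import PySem

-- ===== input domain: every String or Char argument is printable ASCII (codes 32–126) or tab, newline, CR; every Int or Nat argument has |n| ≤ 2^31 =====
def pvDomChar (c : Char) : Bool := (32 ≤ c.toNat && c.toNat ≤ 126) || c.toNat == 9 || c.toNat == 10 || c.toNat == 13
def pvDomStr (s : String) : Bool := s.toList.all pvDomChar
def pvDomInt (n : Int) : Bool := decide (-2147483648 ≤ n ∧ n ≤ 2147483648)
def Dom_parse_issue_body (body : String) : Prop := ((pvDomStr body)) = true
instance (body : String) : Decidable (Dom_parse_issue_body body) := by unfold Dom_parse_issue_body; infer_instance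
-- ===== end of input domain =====

-- B swaps A's mutable section flags for a labelling pass plus separate field derivations (objective: simpler).

-- ===== PORT A =====
-- state: (data, in_item_identifier_section, in_description_section, description_lines)
def aStep (st : PySem.Dict String String × Bool × Bool × List String) (line : String) :
    PySem.Dict String String × Bool × Bool × List String :=
  let s := PySem.Str.strip line
  if s = "### Item Identifier" then (st.1, true, false, st.2.2.2)
  else if s = "### Describe the issue" then (st.1, false, true, st.2.2.2)
  else if st.2.1 = false ∧ st.2.2.1 = false then st
  else if st.2.1 = true then
    (if s ≠ "" ∧ st.1.contains "item-identifier" = false then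
      (st.1.insert "item-identifier" s, false, st.2.2.1, st.2.2.2)
    else st)
  else if st.2.2.1 = true then
    (if s ≠ "" then (st.1, st.2.1, st.2.2.1, st.2.2.2 ++ [s]) else st)
  else st

def parse_issue_body (body : String) : List (String × String) :=
  if body = "" then []
  else
    let lines := PySem.Str.splitlines body
    let r := lines.foldl aStep (PySem.Dict.empty, false, false, [])
    let data := r.1
    let descriptionLines := r.2.2.2
    let data := if descriptionLines ≠ [] then
        data.insert "issue-description" (PySem.Str.join "\n" descriptionLines)
      else data
    data.items

-- ===== PORT B =====
-- state: (current section label, labelled lines collected so far)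
def bLabelStep (st : Option String × List (String × String)) (line : String) :
    Option String × List (String × String) :=
  let s := PySem.Str.strip line
  if s = "### Item Identifier" then (some "item", st.2)
  else if s = "### Describe the issue" then (some "desc", st.2)
  else match st.1 with
    | some lab => (some lab, st.2 ++ [(lab, s)])
    | none => st

def parse_issue_body_alt (body : String) : List (String × String) :=
  if body = "" then []
  else
    let labeled := ((PySem.Str.splitlines body).foldl bLabelStep (none, [])).2
    let item := (labeled.find? (fun p => p.1 == "item" && p.2 != "")).map (·.2)
    let data : PySem.Dict String String := PySem.Dict.empty
    let data := match item with
      | some it => data.insert "item-identifier" it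
      | none => data
    let desc := (labeled.filter (fun p => p.1 == "desc" && p.2 != "")).map (·.2)
    let data := if desc ≠ [] then
        data.insert "issue-description" (PySem.Str.join "\n" desc)
      else data
    data.items

-- ===== PRECONDITION & SPEC =====
def Spec_parse_issue_body (body : String) (out : List (String × String)) : Prop := out = parse_issue_body_alt body
instance (body : String) (out : List (String × String)) : Decidable (Spec_parse_issue_body body out) := by unfold Spec_parse_issue_body; infer_instance

-- ===== CLAIM (what is proved, stated in full; the proofs are below) =====
def Claim_equal_parse_issue_body : Prop := ∀ (body : String), Dom_parse_issue_body body → Spec_parse_issue_body body (parse_issue_body body)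

-- ===== LEMMAS AND PROOFS =====

-- labelled suffix produced by B's first pass from a given starting label
def labelRun (lab : Option String) (lines : List String) : List (String × String) :=
  (lines.foldl bLabelStep (lab, [])).2

-- the item-identifier field, given what A has already stored and B's remaining labelled lines
def itemRes (data : PySem.Dict String String) (lab : Option String) (lines : List String) : Option String :=
  match data.get? "item-identifier" with
  | some v => some v
  | none => ((labelRun lab lines).find? (fun p => p.1 == "item" && p.2 != "")).map (·.2)

def descRes (lab : Option String) (lines : List String) : List String :=
  ((labelRun lab lines).filter (fun p => p.1 == "desc" && p.2 != "")).map (·.2)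

-- B's assembly of the output dict
def resB (item? : Option String) (desc : List String) : List (String × String) :=
  let d : PySem.Dict String String := PySem.Dict.empty
  let d := match item? with
    | some it => d.insert "item-identifier" it
    | none => d
  let d := if desc ≠ [] then d.insert "issue-description" (PySem.Str.join "\n" desc) else d
  d.items

-- A's finalisation of its loop state
def finishA (data : PySem.Dict String String) (descLines : List String) : List (String × String) :=
  (if descLines ≠ [] then data.insert "issue-description" (PySem.Str.join "\n" descLines) else data).items

lemma foldl_bLabelStep_acc (lines : List String) (lab : Option String) (acc : List (String × String)) :
    List.foldl bLabelStep (lab, acc) lines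
      = ((List.foldl bLabelStep (lab, []) lines).1, acc ++ (List.foldl bLabelStep (lab, []) lines).2) := by
  induction lines generalizing lab acc with
  | nil => simp
  | cons l ls ih =>
    simp only [List.foldl, bLabelStep]
    split_ifs with h1 h2
    · rw [ih]
    · rw [ih]
    · cases lab with
      | none => rw [ih]
      | some L =>
        simp only [List.nil_append]
        rw [ih ((some L)) (acc ++ [(L, PySem.Str.strip l)]), ih ((some L)) ([(L, PySem.Str.strip l)])]
        simp

lemma labelRun_cons (lab : Option String) (l : String) (ls : List String) :
    labelRun lab (l :: ls) =
      if PySem.Str.strip l = "### Item Identifier" then labelRun (some "item") ls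
      else if PySem.Str.strip l = "### Describe the issue" then labelRun (some "desc") ls
      else match lab with
        | some L => (L, PySem.Str.strip l) :: labelRun (some L) ls
        | none => labelRun none ls := by
  simp only [labelRun, List.foldl, bLabelStep]
  split_ifs with h1 h2
  · rfl
  · rfl
  · cases lab with
    | none => rfl
    | some L =>
      simp only [List.nil_append]
      rw [foldl_bLabelStep_acc ls (some L) ([(L, PySem.Str.strip l)])]
      simp

lemma main_lemma (lines : List String) :
    ∀ (data : PySem.Dict String String) (inItem inDesc : Bool) (descAcc : List String) (lab : Option String),
    (inItem = true → lab = some "item") →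
    (inDesc = true → lab = some "desc") →
    (inItem = false → inDesc = false →
      lab = none ∨ (lab = some "item" ∧ data.contains "item-identifier" = true)) →
    (data = PySem.Dict.empty ∨ ∃ v, data = PySem.Dict.empty.insert "item-identifier" v) →
    finishA (List.foldl aStep (data, inItem, inDesc, descAcc) lines).1
            (List.foldl aStep (data, inItem, inDesc, descAcc) lines).2.2.2
      = resB (itemRes data lab lines) (descAcc ++ descRes lab lines) := by
  induction lines with
  | nil =>
    intro data inItem inDesc descAcc lab _ _ _ hshape
    simp only [List.foldl, itemRes, descRes, labelRun, finishA, resB]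
    rcases hshape with h | ⟨v, h⟩ <;> subst h <;>
      simp [PySem.Dict.get?_empty, PySem.Dict.get?_insert_self]
  | cons l ls ih =>
    intro data inItem inDesc descAcc lab hItem hDesc hNone hshape
    simp only [List.foldl]
    have hget : data.get? "item-identifier" = (if data.contains "item-identifier" = true then
        some (data.getD "item-identifier" "") else none) := by
      rcases hshape with h | ⟨v, h⟩ <;> subst h <;>
        simp [PySem.Dict.get?_empty, PySem.Dict.get?_insert_self, PySem.Dict.contains_empty,
          PySem.Dict.contains_insert_self, PySem.Dict.getD_insert_self]
    by_cases h1 : PySem.Str.strip l = "### Item Identifier"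
    · have hstep : aStep (data, inItem, inDesc, descAcc) l = (data, true, false, descAcc) := by
        simp [aStep, h1]
      rw [hstep, ih data true false descAcc (some "item") (fun _ => rfl) (by simp) (by simp) hshape]
      simp only [itemRes, descRes, labelRun_cons, h1, if_pos]
    · by_cases h2 : PySem.Str.strip l = "### Describe the issue"
      · have hstep : aStep (data, inItem, inDesc, descAcc) l = (data, false, true, descAcc) := by
          simp [aStep, h2]
        rw [hstep, ih data false true descAcc (some "desc") (by simp) (fun _ => rfl)
          (by intro _ h; cases h) hshape]
        simp [itemRes, descRes, labelRun_cons, h2]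
      · cases inItem with
        | true =>
          have hlab := hItem rfl
          subst hlab
          have hID : inDesc = false := by
            cases hD : inDesc
            · rfl
            · exact absurd (hDesc hD) (by simp)
          subst hID
          by_cases hs : PySem.Str.strip l = ""
          · -- empty line in item section: A no-op; B records ("item",""), which both fields skip
            have hstep : aStep (data, true, false, descAcc) l = (data, true, false, descAcc) := by
              simp [aStep, hs]
            rw [hstep, ih data true false descAcc (some "item") (fun _ => rfl) (by simp) (by simp) hshape]
            simp only [itemRes, descRes, labelRun_cons, h1, h2, if_neg, not_false_iff]
            simp [hs]
          · by_cases hc : data.contains "item-identifier" = true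
            · -- item already stored: A no-op; B's extra labelled line is ignored by the match on get?
              have hstep : aStep (data, true, false, descAcc) l = (data, true, false, descAcc) := by
                simp [aStep, h1, h2, hc]
              rw [hstep, ih data true false descAcc (some "item") (fun _ => rfl) (by simp) (by simp) hshape]
              simp only [itemRes, descRes, labelRun_cons, h1, h2, if_neg, not_false_iff]
              rw [hget]
              simp [hc]
            · -- first non-empty item line: A stores it; B's find? hits it
              have hc' : data.contains "item-identifier" = false := by
                cases h : data.contains "item-identifier"
                · rfl
                · exact absurd h hc
              have hstep : aStep (data, true, false, descAcc) l
                  = (data.insert "item-identifier" (PySem.Str.strip l), false, false, descAcc) := by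
                simp [aStep, h1, h2, hs, hc']
              have hdata : data = PySem.Dict.empty := by
                rcases hshape with h | ⟨v, h⟩
                · exact h
                · subst h; simp [PySem.Dict.contains_insert_self] at hc'
              rw [hstep, ih (data.insert "item-identifier" (PySem.Str.strip l)) false false descAcc
                (some "item") (by simp) (by simp)
                (fun _ _ => Or.inr ⟨rfl, by simp [PySem.Dict.contains_insert_self]⟩)
                (Or.inr ⟨PySem.Str.strip l, by rw [hdata]⟩)]
              have hbne : (PySem.Str.strip l != "") = true := by simpa using hs
              simp only [itemRes, descRes, labelRun_cons, h1, h2, if_neg, not_false_iff]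
              subst hdata
              simp [PySem.Dict.get?_empty, PySem.Dict.get?_insert_self, List.find?, hbne]
        | false =>
          cases inDesc with
          | true =>
            have hlab := hDesc rfl
            subst hlab
            by_cases hs : PySem.Str.strip l = ""
            · have hstep : aStep (data, false, true, descAcc) l = (data, false, true, descAcc) := by
                simp [aStep, hs]
              rw [hstep, ih data false true descAcc (some "desc") (by simp) (fun _ => rfl)
                (by intro _ h; cases h) hshape]
              simp only [itemRes, descRes, labelRun_cons, h1, h2, if_neg, not_false_iff]
              simp [hs]
            · have hstep : aStep (data, false, true, descAcc) l
                  = (data, false, true, descAcc ++ [PySem.Str.strip l]) := by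
                simp [aStep, h1, h2, hs]
              rw [hstep, ih data false true (descAcc ++ [PySem.Str.strip l]) (some "desc") (by simp)
                (fun _ => rfl) (by intro _ h; cases h) hshape]
              have hbne : (PySem.Str.strip l != "") = true := by simpa using hs
              simp only [itemRes, descRes, labelRun_cons, h1, h2, if_neg, not_false_iff]
              simp [hbne, List.filter]
          | false =>
            rcases hNone rfl rfl with hlab | ⟨hlab, hc⟩
            · subst hlab
              have hstep : aStep (data, false, false, descAcc) l = (data, false, false, descAcc) := by
                simp [aStep, h1, h2]
              rw [hstep, ih data false false descAcc none (by simp) (by simp)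
                (fun _ _ => Or.inl rfl) hshape]
              simp only [itemRes, descRes, labelRun_cons, h1, h2, if_neg, not_false_iff]
            · subst hlab
              have hstep : aStep (data, false, false, descAcc) l = (data, false, false, descAcc) := by
                simp [aStep, h1, h2]
              rw [hstep, ih data false false descAcc (some "item") (by simp) (by simp)
                (fun _ _ => Or.inr ⟨rfl, hc⟩) hshape]
              simp only [itemRes, descRes, labelRun_cons, h1, h2, if_neg, not_false_iff]
              rw [hget]
              simp [hc]

-- ===== VERDICT (by name: the statement is the Claim_ definition above) =====
theorem parse_issue_body_spec : Claim_equal_parse_issue_body := by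
  intro body _
  unfold Spec_parse_issue_body parse_issue_body parse_issue_body_alt
  by_cases hb : body = ""
  · simp [hb]
  · simp only [hb, if_neg, not_false_iff]
    have h := main_lemma (PySem.Str.splitlines body) PySem.Dict.empty false false [] none
      (by simp) (by simp) (fun _ _ => Or.inl rfl) (Or.inl rfl)
    simp only [finishA] at h
    rw [h]
    simp only [resB, itemRes, descRes, labelRun, PySem.Dict.get?_empty, List.nil_append] at h ⊢
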